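-- pv_equiv track=rewrite | github.com/kishore270598/problem-solving | greedy_algorithm.py | kItemsWithMaximumSum
-- ===== SOURCE A (Python) =====
-- def kItemsWithMaximumSum(numOnes: int, numZeros: int, numNegOnes: int, k: int) -> int:
--     if(numOnes>=k):
--         return k
--     current_max=0
--     while(k>0):
--         if(numOnes!=0 and numOnes<k):
--             current_max+=numOnes
--             k-=1*(numOnes)
--             numOnes=0
--         elif(numZeros!=0 and k!=0):
--             k-=1*(numZeros)
--             numZeros=0
--         elif(k!=0):
--             current_max+=k*(-1)
--             k=0
--     return current_max
-- ===== SOURCE B (Python) =====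
-- def kItemsWithMaximumSum(numOnes: int, numZeros: int, numNegOnes: int, k: int) -> int:
--     if numOnes >= k:
--         return k
--     if k <= 0:
--         return 0
--     return numOnes - max(0, k - numOnes - numZeros)
-- ===== Notes on version B (the rewrite author's own statement) =====
-- stated objective: simpler
-- what changed: Replaces the mutating while-loop with a closed-form expression: take all ones (numOnes), and subtract only the forced -1 picks max(0, k - numOnes - numZeros).
import Mathlib
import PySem

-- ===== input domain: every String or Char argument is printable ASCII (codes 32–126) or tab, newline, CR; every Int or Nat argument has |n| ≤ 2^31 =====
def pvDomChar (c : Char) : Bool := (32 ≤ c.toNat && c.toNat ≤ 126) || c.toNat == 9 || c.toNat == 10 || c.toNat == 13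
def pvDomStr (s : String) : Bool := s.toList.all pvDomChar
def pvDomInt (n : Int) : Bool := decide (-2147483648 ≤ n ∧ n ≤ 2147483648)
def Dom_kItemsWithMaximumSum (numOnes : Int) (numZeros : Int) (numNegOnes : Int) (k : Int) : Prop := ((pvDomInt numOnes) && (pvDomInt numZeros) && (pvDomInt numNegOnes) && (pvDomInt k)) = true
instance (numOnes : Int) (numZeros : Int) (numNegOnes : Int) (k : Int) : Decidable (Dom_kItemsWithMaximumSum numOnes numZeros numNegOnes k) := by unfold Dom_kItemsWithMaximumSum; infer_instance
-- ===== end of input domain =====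

-- B replaces A's mutating while-loop with a closed-form expression (objective: simpler).
-- ===== PORT A =====
-- A's while-loop, ported as fuelled recursion over its mutable state (numOnes, numZeros, k, current_max).
-- The loop fires at most 3 branches (ones-branch and zeros-branch each zero their variable; the last sets k=0),
-- so fuel 4 is a pure totality device, never exhausted while k>0.
def kLoopA : Nat → Int → Int → Int → Int → Int
  | 0, _, _, _, currentMax => currentMax
  | fuel+1, numOnes, numZeros, k, currentMax =>
    if k > 0 then
      if numOnes ≠ 0 ∧ numOnes < k then
        kLoopA fuel 0 numZeros (k - 1 * numOnes) (currentMax + numOnes)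
      else if numZeros ≠ 0 ∧ k ≠ 0 then
        kLoopA fuel numOnes 0 (k - 1 * numZeros) currentMax
      else if k ≠ 0 then
        kLoopA fuel numOnes numZeros 0 (currentMax + k * (-1))
      else
        currentMax
    else currentMax

def kItemsWithMaximumSum (numOnes : Int) (numZeros : Int) (numNegOnes : Int) (k : Int) : Int :=
  if numOnes ≥ k then k
  else kLoopA 4 numOnes numZeros k 0

-- ===== PORT B =====
def kItemsWithMaximumSum_alt (numOnes : Int) (numZeros : Int) (numNegOnes : Int) (k : Int) : Int :=
  if numOnes ≥ k then k
  else if k ≤ 0 then 0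
  else numOnes - max 0 (k - numOnes - numZeros)

-- ===== PRECONDITION & SPEC =====
def Spec_kItemsWithMaximumSum (numOnes : Int) (numZeros : Int) (numNegOnes : Int) (k : Int) (out : Int) : Prop := out = kItemsWithMaximumSum_alt numOnes numZeros numNegOnes k
instance (numOnes : Int) (numZeros : Int) (numNegOnes : Int) (k : Int) (out : Int) : Decidable (Spec_kItemsWithMaximumSum numOnes numZeros numNegOnes k out) := by unfold Spec_kItemsWithMaximumSum; infer_instance

-- ===== CLAIM (what is proved, stated in full; the proofs are below) =====
def Claim_equal_kItemsWithMaximumSum : Prop := ∀ (numOnes : Int) (numZeros : Int) (numNegOnes : Int) (k : Int), Dom_kItemsWithMaximumSum numOnes numZeros numNegOnes k → Spec_kItemsWithMaximumSum numOnes numZeros numNegOnes k (kItemsWithMaximumSum numOnes numZeros numNegOnes k)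

-- ===== LEMMAS AND PROOFS =====

lemma kLoopA_stop (f : Nat) (o z k c : Int) (h : ¬ 0 < k) : kLoopA f o z k c = c := by
  cases f with
  | zero => rfl
  | succ n => simp only [kLoopA, if_neg h]

lemma kLoopA_noZeros (f : Nat) (o z k c : Int) (hk : 0 < k) (ho : ¬(o ≠ 0 ∧ o < k))
    (hz : z = 0) : kLoopA (f+1) o z k c = c - k := by
  have h2 : ¬(z ≠ 0 ∧ k ≠ 0) := by simp [hz]
  simp only [kLoopA, if_pos hk, if_neg ho, if_neg h2, if_pos (show k ≠ 0 by omega)]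
  rw [kLoopA_stop f o z 0 _ (by omega)]
  ring

lemma kLoopA_zeroOnes (f : Nat) (z k c : Int) (hk : 0 < k) :
    kLoopA (f+2) 0 z k c = c - max 0 (k - z) := by
  by_cases hz : z = 0
  · rw [kLoopA_noZeros (f+1) 0 z k c hk (by simp) hz]; omega
  · have h1 : ¬((0:Int) ≠ 0 ∧ (0:Int) < k) := by simp
    have h2 : z ≠ 0 ∧ k ≠ 0 := ⟨hz, by omega⟩
    have step : kLoopA (f+2) 0 z k c = kLoopA (f+1) 0 0 (k - 1*z) c := by
      conv_lhs => rw [show f+2 = (f+1)+1 from rfl]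
      simp only [kLoopA, if_pos hk, if_neg h1, if_pos h2]
    rw [step]
    by_cases hkz : 0 < k - 1*z
    · rw [kLoopA_noZeros f 0 0 (k-1*z) c hkz (by simp) rfl]; omega
    · rw [kLoopA_stop _ _ _ _ _ hkz]; omega

-- ===== VERDICT (by name: the statement is the Claim_ definition above) =====
theorem kItemsWithMaximumSum_spec : Claim_equal_kItemsWithMaximumSum := by
  intro numOnes numZeros numNegOnes k _
  unfold Spec_kItemsWithMaximumSum kItemsWithMaximumSum kItemsWithMaximumSum_alt
  by_cases h1 : numOnes ≥ k
  · simp [h1]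
  · rw [if_neg h1, if_neg h1]
    by_cases h2 : k ≤ 0
    · rw [kLoopA_stop _ _ _ _ _ (by omega), if_pos h2]
    · have hk : 0 < k := by omega
      rw [if_neg h2]
      by_cases ho : numOnes = 0
      · subst ho
        rw [show (4:Nat) = 2+2 from rfl, kLoopA_zeroOnes _ _ _ _ hk]
        omega
      · have step : kLoopA 4 numOnes numZeros k 0
            = kLoopA 3 0 numZeros (k - 1*numOnes) (0 + numOnes) := by
          conv_lhs => rw [show (4:Nat) = 3+1 from rfl]
          simp only [kLoopA, if_pos hk, if_pos (show numOnes ≠ 0 ∧ numOnes < k from ⟨ho, by omega⟩)]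
        rw [step, show (3:Nat) = 1+2 from rfl, kLoopA_zeroOnes _ _ _ _ (by omega)]
        omega
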